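-- pv_equiv track=rewrite | github.com/nestor4513289/ARQUITECTURA-DE-COMPUTADORAS- | ejercicios/EJERCICIO 1.PY | decimal_to_base_three
-- ===== SOURCE A (Python) =====
-- def decimal_to_base_three(decimal_num):
--     if decimal_num == 0:
--         return '0'
--
--     base_three_num = ''
--     while decimal_num > 0:
--         remainder = decimal_num % 3
--         base_three_num = str(remainder) + base_three_num
--         decimal_num //= 3
--
--     return base_three_num
-- ===== SOURCE B (Python) =====
-- def decimal_to_base_three(decimal_num):
--     if decimal_num <= 0:
--         return '0' if decimal_num == 0 else ''
--     p = 1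
--     while p * 3 <= decimal_num:
--         p *= 3
--     digits = []
--     while p >= 1:
--         digits.append(str(decimal_num // p % 3))
--         p //= 3
--     return ''.join(digits)
-- ===== Notes on version B (the rewrite author's own statement) =====
-- stated objective: alternative
-- what changed: Replaces the LSB-first remainder loop that prepends onto a string by MSB-first extraction: first find the largest power of the base not exceeding the input, then read each digit top-down by floor-dividing by the descending powers, collecting into a list joined at the end.
import Mathlib
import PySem

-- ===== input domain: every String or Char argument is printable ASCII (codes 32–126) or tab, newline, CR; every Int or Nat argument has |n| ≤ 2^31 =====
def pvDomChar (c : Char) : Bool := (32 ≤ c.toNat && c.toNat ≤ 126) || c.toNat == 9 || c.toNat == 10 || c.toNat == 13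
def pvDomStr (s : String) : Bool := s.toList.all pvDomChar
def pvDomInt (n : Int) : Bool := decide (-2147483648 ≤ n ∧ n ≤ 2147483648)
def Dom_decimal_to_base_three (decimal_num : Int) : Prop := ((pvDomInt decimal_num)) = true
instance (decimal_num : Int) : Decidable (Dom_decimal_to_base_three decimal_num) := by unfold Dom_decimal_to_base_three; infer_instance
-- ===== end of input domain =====

-- B extracts digits most-significant-first (largest power of 3 ≤ n, then n // p % 3 top-down)
-- instead of A's LSB-first remainder loop with string prepending; same return value on every Int.
-- ===== PORT A =====
-- while decimal_num > 0: remainder = n % 3; acc = str(remainder) + acc; n //= 3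
def pvALoop (n : Int) (acc : String) : String :=
  if _h : 0 < n then
    pvALoop (PySem.Int.floordiv n 3) (PySem.Int.toStr (PySem.Int.mod n 3) ++ acc)
  else acc
termination_by n.toNat
decreasing_by
  have h3 : PySem.Int.floordiv n 3 = n / 3 := PySem.Int.floordiv_eq_ediv_of_pos (by omega)
  rw [h3]; omega

def decimal_to_base_three (decimal_num : Int) : String :=
  if decimal_num = 0 then "0"
  else pvALoop decimal_num ""

-- ===== PORT B =====
-- while p * 3 <= decimal_num: p *= 3    (the '1 ≤ p' conjunct is a termination guard only:
-- every call from the entry point has p ≥ 1, where the condition coincides with Python's)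
def pvFindPow (n p : Int) : Int :=
  if _h : 1 ≤ p ∧ p * 3 ≤ n then pvFindPow n (p * 3) else p
termination_by (n - p).toNat
decreasing_by omega

-- while p >= 1: digits.append(str(decimal_num // p % 3)); p //= 3
def pvDigits (n p : Int) : List String :=
  if _h : 1 ≤ p then
    PySem.Int.toStr (PySem.Int.mod (PySem.Int.floordiv n p) 3) :: pvDigits n (PySem.Int.floordiv p 3)
  else []
termination_by p.toNat
decreasing_by
  have h3 : PySem.Int.floordiv p 3 = p / 3 := PySem.Int.floordiv_eq_ediv_of_pos (by omega)
  have h4 := Int.ediv_add_emod p 3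
  have h5 := Int.emod_nonneg p (by norm_num : (3:Int) ≠ 0)
  have h6 := Int.emod_lt_of_pos p (by norm_num : (0:Int) < 3)
  rw [h3]; omega

def decimal_to_base_three_alt (decimal_num : Int) : String :=
  if decimal_num ≤ 0 then (if decimal_num = 0 then "0" else "")
  else String.join (pvDigits decimal_num (pvFindPow decimal_num 1))

-- ===== PRECONDITION & SPEC =====
def Spec_decimal_to_base_three (decimal_num : Int) (out : String) : Prop := out = decimal_to_base_three_alt decimal_num
instance (decimal_num : Int) (out : String) : Decidable (Spec_decimal_to_base_three decimal_num out) := by unfold Spec_decimal_to_base_three; infer_instance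

-- ===== CLAIM (what is proved, stated in full; the proofs are below) =====
def Claim_equal_decimal_to_base_three : Prop := ∀ (decimal_num : Int), Dom_decimal_to_base_three decimal_num → Spec_decimal_to_base_three decimal_num (decimal_to_base_three decimal_num)

-- ===== LEMMAS AND PROOFS =====

-- canonical value: the base-3 digits of n, LSB peeled last (proof-only helper)
def pvRep (n : Int) : String :=
  if _h : n ≤ 0 then ""
  else pvRep (n / 3) ++ PySem.Int.toStr (n % 3)
termination_by n.toNat
decreasing_by
  have h4 := Int.ediv_add_emod n 3
  have h5 := Int.emod_nonneg n (by norm_num : (3:Int) ≠ 0)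
  have h6 := Int.emod_lt_of_pos n (by norm_num : (0:Int) < 3)
  omega

-- exactly k base-3 digits of n, MSB first (proof-only helper)
def pvPad : Nat → Int → String
  | 0, _ => ""
  | k+1, n => PySem.Int.toStr (n / (3:Int)^k % 3) ++ pvPad k n

theorem pv_foldl_append (l : List String) : ∀ (x y : String),
    List.foldl (fun r s => r ++ s) (x ++ y) l = x ++ List.foldl (fun r s => r ++ s) y l := by
  induction l with
  | nil => intro x y; rfl
  | cons a l ih => intro x y; simp only [List.foldl_cons, String.append_assoc, ih]

theorem pv_join_cons (s : String) (l : List String) : String.join (s :: l) = s ++ String.join l := by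
  simp only [String.join, List.foldl_cons]
  rw [show ("" ++ s : String) = s ++ "" by simp, pv_foldl_append]

-- A's loop computes pvRep, carried accumulator appended on the right
theorem pvALoop_eq (k : Nat) : ∀ (n : Int) (acc : String), n.toNat ≤ k →
    pvALoop n acc = pvRep n ++ acc := by
  induction k with
  | zero =>
    intro n acc hk
    rw [pvALoop, pvRep]
    have : ¬ 0 < n := by omega
    simp [this, show n ≤ 0 by omega]
  | succ k ih =>
    intro n acc hk
    rw [pvALoop, pvRep]
    by_cases h : 0 < n
    · have h3 : PySem.Int.floordiv n 3 = n / 3 := PySem.Int.floordiv_eq_ediv_of_pos (by omega)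
      have hm : PySem.Int.mod n 3 = n % 3 := PySem.Int.mod_eq_emod_of_pos (by omega)
      have h4 := Int.ediv_add_emod n 3
      have h5 := Int.emod_nonneg n (by norm_num : (3:Int) ≠ 0)
      have h6 := Int.emod_lt_of_pos n (by norm_num : (0:Int) < 3)
      simp only [h, dif_pos, show ¬ n ≤ 0 by omega, dif_neg, not_false_iff, h3, hm]
      rw [ih (n / 3) _ (by omega)]
      rw [String.append_assoc]
    · simp [h, show n ≤ 0 by omega]

-- B's digit loop, started at 3^k, produces the k+1 MSB-first digits
theorem pvDigits_eq (k : Nat) : ∀ (n : Int),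
    String.join (pvDigits n ((3:Int)^k)) = pvPad (k+1) n := by
  induction k with
  | zero =>
    intro n
    rw [pvDigits]
    have h1 : (1:Int) ≤ 3^0 := by norm_num
    have hfd : PySem.Int.floordiv ((3:Int)^0) 3 = 0 := by
      simp [PySem.Int.floordiv_eq_ediv_of_pos (by norm_num : (0:Int) < 3)]
    have hn : PySem.Int.floordiv n ((3:Int)^0) = n := by
      simp [PySem.Int.floordiv_eq_ediv_of_pos (by norm_num : (0:Int) < (3:Int)^0)]
    have hm : ∀ a : Int, PySem.Int.mod a 3 = a % 3 := fun a => PySem.Int.mod_eq_emod_of_pos (by norm_num)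
    rw [dif_pos h1, hfd, hn, hm, pvDigits]
    simp [pvPad, pv_join_cons, String.join]
  | succ k ih =>
    intro n
    rw [pvDigits]
    have hp : (0:Int) < 3^(k+1) := by positivity
    have hfd : PySem.Int.floordiv ((3:Int)^(k+1)) 3 = (3:Int)^k := by
      rw [PySem.Int.floordiv_eq_ediv_of_pos (by norm_num : (0:Int) < 3)]
      rw [pow_succ]
      exact Int.mul_ediv_cancel _ (by norm_num)
    have hn : PySem.Int.floordiv n ((3:Int)^(k+1)) = n / 3^(k+1) :=
      PySem.Int.floordiv_eq_ediv_of_pos hp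
    have hm : ∀ a : Int, PySem.Int.mod a 3 = a % 3 := fun a => PySem.Int.mod_eq_emod_of_pos (by norm_num)
    rw [dif_pos (by omega : (1:Int) ≤ 3^(k+1)), hfd, hn, hm, pv_join_cons, ih n]
    rfl

-- peeling the LSB instead of the MSB from a fixed-width digit string
theorem pvPad_succ_lsb (k : Nat) : ∀ (n : Int),
    pvPad (k+1) n = pvPad k (n / 3) ++ PySem.Int.toStr (n % 3) := by
  induction k with
  | zero => intro n; simp [pvPad]
  | succ k ih =>
    intro n
    have hdd : n / 3 / (3:Int)^k = n / (3:Int)^(k+1) := by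
      rw [Int.ediv_ediv_of_nonneg (by norm_num : (0:Int) ≤ 3), ← pow_succ']
    show PySem.Int.toStr (n / (3:Int)^(k+1) % 3) ++ pvPad (k+1) n = _
    rw [ih n, pvPad, hdd, String.append_assoc]

-- a fixed-width digit string with no leading zero is pvRep
theorem pvPad_eq_rep (k : Nat) : ∀ (n : Int), (3:Int)^k ≤ n → n < (3:Int)^(k+1) →
    pvPad (k+1) n = pvRep n := by
  induction k with
  | zero =>
    intro n h1 h2
    simp only [pow_zero, pow_one] at h1 h2
    rw [pvRep]
    have hd : n / 3 = 0 := Int.ediv_eq_zero_of_lt (by omega) (by omega)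
    rw [pvRep] at *
    simp [pvPad, show ¬ n ≤ 0 by omega, hd, show (0:Int) ≤ 0 by omega]
  | succ k ih =>
    intro n h1 h2
    have hps : (3:Int)^(k+1) = 3^k * 3 := pow_succ 3 k
    have hps2 : (3:Int)^(k+1+1) = 3^(k+1) * 3 := pow_succ 3 (k+1)
    have h4 := Int.ediv_add_emod n 3
    have h5 := Int.emod_nonneg n (by norm_num : (3:Int) ≠ 0)
    have h6 := Int.emod_lt_of_pos n (by norm_num : (0:Int) < 3)
    have hb1 : (3:Int)^k ≤ n / 3 := by omega
    have hb2 : n / 3 < (3:Int)^(k+1) := by omega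
    have hrn : pvRep n = pvRep (n / 3) ++ PySem.Int.toStr (n % 3) := by
      rw [pvRep, dif_neg (show ¬ n ≤ 0 by omega)]
    rw [pvPad_succ_lsb, ih (n / 3) hb1 hb2, hrn]

-- pvFindPow returns the largest power of 3 not exceeding n (for 1 ≤ p = 3^j ≤ n)
theorem pvFindPow_spec (m : Nat) : ∀ (n p : Int) (j : Nat), (n - p).toNat ≤ m →
    p = (3:Int)^j → p ≤ n →
    ∃ k : Nat, pvFindPow n p = (3:Int)^k ∧ (3:Int)^k ≤ n ∧ n < (3:Int)^(k+1) := by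
  induction m with
  | zero =>
    intro n p j hm hpj hpn
    have hp0 : (0:Int) < 3^j := pow_pos (by norm_num) j
    have hp1 : (1:Int) ≤ p := by rw [hpj]; omega
    rw [pvFindPow]
    have : ¬ (1 ≤ p ∧ p * 3 ≤ n) := by omega
    rw [dif_neg this]
    exact ⟨j, hpj, hpj ▸ hpn, by rw [pow_succ]; omega⟩
  | succ m ih =>
    intro n p j hm hpj hpn
    have hp0 : (0:Int) < 3^j := pow_pos (by norm_num) j
    have hp1 : (1:Int) ≤ p := by rw [hpj]; omega
    rw [pvFindPow]
    by_cases h : 1 ≤ p ∧ p * 3 ≤ n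
    · rw [dif_pos h]
      exact ih n (p * 3) (j+1) (by omega) (by rw [pow_succ, hpj]) h.2
    · rw [dif_neg h]
      exact ⟨j, hpj, hpj ▸ hpn, by rw [pow_succ, ← hpj]; omega⟩

-- ===== VERDICT (by name: the statement is the Claim_ definition above) =====
theorem decimal_to_base_three_spec : Claim_equal_decimal_to_base_three := by
  intro n _
  unfold Spec_decimal_to_base_three decimal_to_base_three decimal_to_base_three_alt
  by_cases h0 : n = 0
  · simp [h0]
  · by_cases hneg : n ≤ 0
    · rw [if_neg h0, if_pos hneg, if_neg h0, pvALoop, dif_neg (by omega : ¬ 0 < n)]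
    · rw [if_neg h0, if_neg hneg]
      obtain ⟨k, hfp, hk1, hk2⟩ :=
        pvFindPow_spec (n - 1).toNat n 1 0 (by omega) (by norm_num) (by omega)
      rw [pvALoop_eq n.toNat n "" le_rfl, String.append_empty, hfp, pvDigits_eq,
        pvPad_eq_rep k n hk1 hk2]
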